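-- pv_equiv track=rewrite | github.com/opkwisdom/rag-dataset | DataProcess/code/preprocess.py | find_passage_for_answer
-- ===== SOURCE A (Python) =====
-- def find_passage_for_answer(passages, answer_start,answer_text):
--     # answer_start를 이용해 정답이 속한 passage를 찾음
--     current_position = 0
--     for passage in passages:
--         passage_end = current_position + len(passage)
--         if current_position <= answer_start < passage_end:
--             # 정답이 passage 범위에 포함되나, 일부가 다음 passage로 넘어가는 경우를 처리
--             answer_end = answer_start + len(answer_text)
--             if answer_end > passage_end:
--                 return None  # 정답이 여러 passage에 걸쳐 있는 경우 예외 처리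
--             return passage
--         current_position = passage_end + 1  # 공백을 고려해 위치 조정
--     return None
-- ===== SOURCE B (Python) =====
-- # B: precompute passage start offsets once, then binary-search (bisect_right,
-- # hand-written since A imports nothing) for the span holding answer_start.
-- def _bisect_right(a, x):
--     lo, hi = 0, len(a)
--     while lo < hi:
--         mid = (lo + hi) // 2
--         if x < a[mid]:
--             hi = mid
--         else:
--             lo = mid + 1
--     return lo
--
-- def find_passage_for_answer(passages, answer_start, answer_text):
--     starts = []
--     pos = 0
--     for p in passages:
--         starts.append(pos)
--         pos += len(p) + 1
--     k = _bisect_right(starts, answer_start)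
--     if k == 0:
--         return None
--     i = k - 1
--     end = starts[i] + len(passages[i])
--     if answer_start < end and answer_start + len(answer_text) <= end:
--         return passages[i]
--     return None
-- ===== Notes on version B (the rewrite author's own statement) =====
-- stated objective: alternative
-- what changed: Replaces A's single linear scan carrying a running offset by precomputing the list of passage start offsets and binary-searching (hand-written bisect_right) for the rightmost start <= answer_start, then checking containment once.
import Mathlib
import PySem

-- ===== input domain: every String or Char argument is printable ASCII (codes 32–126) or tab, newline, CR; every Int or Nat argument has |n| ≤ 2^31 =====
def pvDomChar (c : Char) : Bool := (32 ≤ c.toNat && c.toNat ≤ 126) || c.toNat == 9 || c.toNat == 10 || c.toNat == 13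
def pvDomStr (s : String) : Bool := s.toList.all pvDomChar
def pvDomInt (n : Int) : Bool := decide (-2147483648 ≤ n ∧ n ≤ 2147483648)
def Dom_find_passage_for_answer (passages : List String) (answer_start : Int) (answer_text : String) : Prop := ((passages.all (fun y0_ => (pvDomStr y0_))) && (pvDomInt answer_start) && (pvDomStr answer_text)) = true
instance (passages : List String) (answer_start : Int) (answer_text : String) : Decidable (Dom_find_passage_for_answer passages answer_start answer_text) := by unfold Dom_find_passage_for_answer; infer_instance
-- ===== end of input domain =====

-- B precomputes passage start offsets and binary-searches for the containing span;
-- equivalence of return values is proved for all inputs (A is total, no mutation).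

-- ===== PORT A =====
-- the for-loop of A, carrying current_position
def loopA (passages : List String) (ans tlen cur : Int) : Option String :=
  match passages with
  | [] => none
  | p :: rest =>
    let pend := cur + PySem.Str.len p
    if cur ≤ ans ∧ ans < pend then
      if ans + tlen > pend then none else some p
    else loopA rest ans tlen (pend + 1)

def find_passage_for_answer (passages : List String) (answer_start : Int) (answer_text : String) : Option String :=
  loopA passages answer_start (PySem.Str.len answer_text) 0

-- ===== PORT B =====
-- Source B's offset-building loop
def buildStarts (passages : List String) (pos : Int) : List Int :=
  match passages with
  | [] => []
  | p :: rest => pos :: buildStarts rest (pos + PySem.Str.len p + 1)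

-- Source B's hand-written bisect_right (while lo < hi); a[mid] is always in range
-- when hi ≤ len a, so getD is an exact port of the Python indexing there.
-- fuel = hi - lo only makes the while-loop a structural recursion (totality
-- bookkeeping); it never changes the computation.
def bisectRGo (a : List Int) (x : Int) (lo hi fuel : Nat) : Nat :=
  match fuel with
  | 0 => lo
  | Nat.succ fuel =>
    if lo < hi then
      if x < a.getD ((lo + hi) / 2) 0 then bisectRGo a x lo ((lo + hi) / 2) fuel
      else bisectRGo a x ((lo + hi) / 2 + 1) hi fuel
    else lo

def bisectR (a : List Int) (x : Int) (lo hi : Nat) : Nat :=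
  bisectRGo a x lo hi (hi - lo)

def find_passage_for_answer_alt (passages : List String) (answer_start : Int) (answer_text : String) : Option String :=
  let starts := buildStarts passages 0
  let k := bisectR starts answer_start 0 starts.length
  if k = 0 then none
  else
    let i := k - 1
    let e := starts.getD i 0 + PySem.Str.len (passages.getD i "")
    if answer_start < e ∧ answer_start + PySem.Str.len answer_text ≤ e then
      some (passages.getD i "")
    else none

-- ===== PRECONDITION & SPEC =====
def Spec_find_passage_for_answer (passages : List String) (answer_start : Int) (answer_text : String) (out : Option String) : Prop := out = find_passage_for_answer_alt passages answer_start answer_text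
instance (passages : List String) (answer_start : Int) (answer_text : String) (out : Option String) : Decidable (Spec_find_passage_for_answer passages answer_start answer_text out) := by unfold Spec_find_passage_for_answer; infer_instance

-- ===== CLAIM (what is proved, stated in full; the proofs are below) =====
def Claim_equal_find_passage_for_answer : Prop := ∀ (passages : List String) (answer_start : Int) (answer_text : String), Dom_find_passage_for_answer passages answer_start answer_text → Spec_find_passage_for_answer passages answer_start answer_text (find_passage_for_answer passages answer_start answer_text)

-- ===== LEMMAS AND PROOFS =====

-- length of s as Int is nonnegative
lemma strLen_nonneg (s : String) : 0 ≤ PySem.Str.len s := by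
  simp [PySem.Str.len_eq]

lemma buildStarts_lb (passages : List String) (pos : Int) :
    ∀ y ∈ buildStarts passages pos, pos ≤ y := by
  induction passages generalizing pos with
  | nil => simp [buildStarts]
  | cons p rest ih =>
    intro y hy
    simp only [buildStarts, List.mem_cons] at hy
    rcases hy with rfl | hy
    · exact le_refl _
    · have h1 := ih (pos + PySem.Str.len p + 1) y hy
      have h2 := strLen_nonneg p
      omega

lemma buildStarts_mono (passages : List String) (pos : Int) :
    ∀ i j, i ≤ j → j < (buildStarts passages pos).length →
      (buildStarts passages pos).getD i 0 ≤ (buildStarts passages pos).getD j 0 := by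
  induction passages generalizing pos with
  | nil => simp [buildStarts]
  | cons p rest ih =>
    intro i j hij hj
    simp only [buildStarts, List.length_cons] at hj ⊢
    match i, j with
    | 0, 0 => exact le_refl _
    | 0, Nat.succ j =>
      have hj' : j < (buildStarts rest (pos + PySem.Str.len p + 1)).length := by
        simpa using hj
      have hmem : (buildStarts rest (pos + PySem.Str.len p + 1)).getD j 0 ∈
          buildStarts rest (pos + PySem.Str.len p + 1) := by
        rw [List.getD_eq_getElem _ _ hj']
        exact List.getElem_mem hj'
      have h1 := buildStarts_lb rest (pos + PySem.Str.len p + 1) _ hmem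
      have h2 := strLen_nonneg p
      simp only [List.getD_cons_zero, List.getD_cons_succ]
      omega
    | Nat.succ i, Nat.succ j =>
      simp only [List.getD_cons_succ]
      exact ih _ i j (by omega) (by simpa using hj)

-- the count of leading starts ≤ ans (= length of the matched prefix)
def cntLe (ans : Int) : List Int → Nat
  | [] => 0
  | s :: rest => if s ≤ ans then cntLe ans rest + 1 else 0

lemma cntLe_le_length (ans : Int) (a : List Int) : cntLe ans a ≤ a.length := by
  induction a with
  | nil => simp [cntLe]
  | cons s rest ih => simp only [cntLe, List.length_cons]; split <;> omega

lemma cntLe_lt (ans : Int) (a : List Int) :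
    ∀ i, i < cntLe ans a → a.getD i 0 ≤ ans := by
  induction a with
  | nil => simp [cntLe]
  | cons s rest ih =>
    intro i hi
    by_cases hs : s ≤ ans
    · simp only [cntLe, if_pos hs] at hi
      match i with
      | 0 => simpa using hs
      | Nat.succ i => simp only [List.getD_cons_succ]; exact ih i (by omega)
    · simp only [cntLe, if_neg hs] at hi
      omega

lemma cntLe_at (ans : Int) (a : List Int) (h : cntLe ans a < a.length) :
    ans < a.getD (cntLe ans a) 0 := by
  induction a with
  | nil => simp [cntLe] at h
  | cons s rest ih =>
    by_cases hs : s ≤ ans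
    · simp only [cntLe, if_pos hs, List.length_cons] at h ⊢
      simp only [List.getD_cons_succ]
      exact ih (by omega)
    · simp only [cntLe, if_neg hs, List.getD_cons_zero]
      omega

-- my binary search computes cntLe on a (getD-)monotone list
lemma bisectRGo_spec (a : List Int) (x : Int) :
    ∀ fuel lo hi, hi - lo ≤ fuel → lo ≤ hi → hi ≤ a.length →
      (∀ i j, i ≤ j → j < a.length → a.getD i 0 ≤ a.getD j 0) →
      (lo ≤ bisectRGo a x lo hi fuel ∧ bisectRGo a x lo hi fuel ≤ hi ∧
       (∀ i, lo ≤ i → i < bisectRGo a x lo hi fuel → a.getD i 0 ≤ x) ∧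
       (∀ i, bisectRGo a x lo hi fuel ≤ i → i < hi → x < a.getD i 0)) := by
  intro fuel
  induction fuel with
  | zero =>
    intro lo hi hn hlh hhl hmono
    simp only [bisectRGo]
    exact ⟨le_refl _, by omega, by omega, by omega⟩
  | succ fuel IH =>
    intro lo hi hn hlh hhl hmono
    simp only [bisectRGo]
    by_cases h : lo < hi
    · rw [if_pos h]
      by_cases hx : x < a.getD ((lo + hi) / 2) 0
      · rw [if_pos hx]
        obtain ⟨h1, h2, h3, h4⟩ :=
          IH lo ((lo + hi) / 2) (by omega) (by omega) (by omega) hmono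
        refine ⟨h1, by omega, h3, ?_⟩
        intro i hri hih
        by_cases him : i < (lo + hi) / 2
        · exact h4 i hri him
        · have hm := hmono ((lo + hi) / 2) i (by omega) (by omega)
          omega
      · rw [if_neg hx]
        obtain ⟨h1, h2, h3, h4⟩ :=
          IH ((lo + hi) / 2 + 1) hi (by omega) (by omega) hhl hmono
        refine ⟨by omega, h2, ?_, h4⟩
        intro i hli hir
        by_cases him : (lo + hi) / 2 + 1 ≤ i
        · exact h3 i him hir
        · have hm := hmono i ((lo + hi) / 2) (by omega) (by omega)
          omega
    · rw [if_neg h]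
      exact ⟨le_refl _, by omega, by omega, by omega⟩

lemma bisectR_eq_cntLe (a : List Int) (x : Int)
    (hmono : ∀ i j, i ≤ j → j < a.length → a.getD i 0 ≤ a.getD j 0) :
    bisectR a x 0 a.length = cntLe x a := by
  obtain ⟨h1, h2, h3, h4⟩ :=
    bisectRGo_spec a x (a.length - 0) 0 a.length (le_refl _) (by omega) (le_refl _) hmono
  show bisectRGo a x 0 a.length (a.length - 0) = cntLe x a
  have htl := cntLe_le_length x a
  by_contra hne
  rcases Nat.lt_or_ge (bisectRGo a x 0 a.length (a.length - 0)) (cntLe x a) with hlt | hge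
  · have h5 := cntLe_lt x a _ hlt
    have h6 := h4 _ (le_refl _) (by omega)
    omega
  · have hlt : cntLe x a < bisectRGo a x 0 a.length (a.length - 0) := by omega
    have h5 := h3 _ (Nat.zero_le _) hlt
    have h6 := cntLe_at x a (by omega)
    omega

-- B's body with bisect replaced by cntLe, generalized over the starting offset
def bLin (passages : List String) (ans tlen cur : Int) : Option String :=
  let starts := buildStarts passages cur
  let k := cntLe ans starts
  if k = 0 then none
  else
    let i := k - 1
    let e := starts.getD i 0 + PySem.Str.len (passages.getD i "")
    if ans < e ∧ ans + tlen ≤ e then some (passages.getD i "") else none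

lemma loopA_none_of_lt (passages : List String) (ans tlen cur : Int) (h : ans < cur) :
    loopA passages ans tlen cur = none := by
  induction passages generalizing cur with
  | nil => simp [loopA]
  | cons p rest ih =>
    have hL := strLen_nonneg p
    simp only [loopA]
    rw [if_neg (by omega)]
    exact ih _ (by omega)

lemma cntLe_zero_of_lt (ans cur : Int) (passages : List String) (h : ans < cur) :
    cntLe ans (buildStarts passages cur) = 0 := by
  cases passages with
  | nil => simp [buildStarts, cntLe]
  | cons p rest => simp only [buildStarts, cntLe]; rw [if_neg (by omega)]

lemma bLin_none_of_lt (passages : List String) (ans tlen cur : Int) (h : ans < cur) :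
    bLin passages ans tlen cur = none := by
  simp [bLin, cntLe_zero_of_lt ans cur passages h]

lemma bLin_cons_here (p : String) (rest : List String) (ans tlen cur : Int)
    (h1 : cur ≤ ans) (h2 : ans < cur + PySem.Str.len p + 1) :
    bLin (p :: rest) ans tlen cur =
      if ans < cur + PySem.Str.len p ∧ ans + tlen ≤ cur + PySem.Str.len p
      then some p else none := by
  simp only [bLin, buildStarts, cntLe,
    cntLe_zero_of_lt ans (cur + PySem.Str.len p + 1) rest (by omega), if_pos h1]
  simp

lemma bLin_cons_skip (p : String) (rest : List String) (ans tlen cur : Int)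
    (h : cur + PySem.Str.len p + 1 ≤ ans) :
    bLin (p :: rest) ans tlen cur = bLin rest ans tlen (cur + PySem.Str.len p + 1) := by
  have hL := strLen_nonneg p
  cases rest with
  | nil =>
    simp only [bLin, buildStarts, cntLe, if_pos (show cur ≤ ans by omega)]
    norm_num [List.getD_cons_zero]
    simp only [PySem.Str.len_eq, String.length_toList] at h hL
    omega
  | cons q rrest =>
    simp only [bLin, buildStarts, cntLe]
    rw [if_pos (show cur ≤ ans by omega), if_pos (show cur + PySem.Str.len p + 1 ≤ ans from h)]
    generalize cntLe ans (buildStarts rrest (cur + PySem.Str.len p + 1 + PySem.Str.len q + 1)) = c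
    simp only [Nat.succ_ne_zero, if_false, Nat.add_sub_cancel, List.getD_cons_succ]

lemma loopA_eq_bLin (passages : List String) (ans tlen : Int) :
    ∀ cur, loopA passages ans tlen cur = bLin passages ans tlen cur := by
  induction passages with
  | nil => intro cur; simp [loopA, bLin, buildStarts, cntLe]
  | cons p rest ih =>
    intro cur
    have hL := strLen_nonneg p
    by_cases h1 : ans < cur
    · rw [loopA_none_of_lt _ _ _ _ h1, bLin_none_of_lt _ _ _ _ h1]
    · by_cases h2 : ans < cur + PySem.Str.len p + 1
      · rw [bLin_cons_here p rest ans tlen cur (by omega) h2]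
        simp only [loopA]
        by_cases h3 : ans < cur + PySem.Str.len p
        · rw [if_pos (show cur ≤ ans ∧ ans < cur + PySem.Str.len p from ⟨by omega, h3⟩)]
          by_cases h4 : ans + tlen > cur + PySem.Str.len p
          · rw [if_pos h4, if_neg (by omega)]
          · rw [if_neg h4, if_pos (show ans < cur + PySem.Str.len p ∧
                ans + tlen ≤ cur + PySem.Str.len p from ⟨h3, by omega⟩)]
        · rw [if_neg (show ¬ (cur ≤ ans ∧ ans < cur + PySem.Str.len p) by omega),
            loopA_none_of_lt _ _ _ _ (by omega), if_neg (by omega)]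
      · rw [bLin_cons_skip p rest ans tlen cur (by omega)]
        simp only [loopA]
        rw [if_neg (show ¬ (cur ≤ ans ∧ ans < cur + PySem.Str.len p) by omega)]
        exact ih _

theorem equal_all (passages : List String) (ans : Int) (txt : String) :
    find_passage_for_answer passages ans txt = find_passage_for_answer_alt passages ans txt := by
  unfold find_passage_for_answer find_passage_for_answer_alt
  rw [loopA_eq_bLin]
  simp only [bLin]
  rw [bisectR_eq_cntLe _ _ (buildStarts_mono passages 0)]

-- ===== VERDICT (by name: the statement is the Claim_ definition above) =====
theorem find_passage_for_answer_spec : Claim_equal_find_passage_for_answer := by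
  intro passages ans txt _hdom
  unfold Spec_find_passage_for_answer
  exact equal_all passages ans txt
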